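-- pv_equiv track=rewrite | github.com/gelineau/advent_of_code | day2023.10/star2.py | simplify_input
-- ===== SOURCE A (Python) =====
-- def simplify_input(input, cells):
--     for row, line in enumerate(input):
--         new_line = ""
--         for column, cell in enumerate(line):
--             if (row, column) in cells:
--                 new_line += cell
--             else:
--                 new_line += "."
--         yield new_line
-- ===== SOURCE B (Python) =====
-- def simplify_input(input, cells):
--     # Group the allowed columns by row once, then stamp each line from a dot template.
--     cols_by_row = {}
--     for r, c in cells:
--         cols_by_row.setdefault(r, set()).add(c)
--     for row, line in enumerate(input):
--         chars = ['.'] * len(line)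
--         for c in cols_by_row.get(row, ()):
--             if 0 <= c < len(line):
--                 chars[c] = line[c]
--         yield ''.join(chars)
-- ===== Notes on version B (the rewrite author's own statement) =====
-- stated objective: faster
-- what changed: Instead of testing (row,column) set membership for every character and growing the line by string concatenation, B builds a row->set-of-columns index from cells once and fills a dot template per line, writing back only the indexed in-range columns.
import Mathlib
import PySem

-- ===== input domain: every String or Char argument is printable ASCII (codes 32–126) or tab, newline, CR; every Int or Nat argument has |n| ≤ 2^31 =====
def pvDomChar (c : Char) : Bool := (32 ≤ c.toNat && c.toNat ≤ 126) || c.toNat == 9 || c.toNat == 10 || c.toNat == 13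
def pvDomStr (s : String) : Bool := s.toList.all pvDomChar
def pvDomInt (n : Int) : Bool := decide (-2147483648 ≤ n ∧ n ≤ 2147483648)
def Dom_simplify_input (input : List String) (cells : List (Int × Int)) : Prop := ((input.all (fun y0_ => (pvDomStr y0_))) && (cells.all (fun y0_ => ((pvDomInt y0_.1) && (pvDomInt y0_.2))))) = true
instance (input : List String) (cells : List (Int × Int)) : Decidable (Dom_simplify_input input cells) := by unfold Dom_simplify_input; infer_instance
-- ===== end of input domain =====

-- B replaces the per-character membership test in cells by a row -> column-set index
-- built once from cells, then stamps each line from a dot template (alternative decomposition;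
-- equivalence of the returned list of lines is proved below).


-- ===== PORT A =====
-- for row, line in enumerate(input): build new_line char by char, yield it.
def simplify_input (input : List String) (cells : List (Int × Int)) : List String :=
  (PySem.List.enumerate input).map (fun rl =>
    String.ofList ((PySem.List.enumerate rl.2.toList).foldl
      (fun new_line cc =>
        if (rl.1, cc.1) ∈ cells then new_line ++ [cc.2] else new_line ++ ['.'])
      []))

-- ===== PORT B =====
-- group columns by row, then per line stamp a dot template at the in-range allowed columns.
def simplify_input_alt (input : List String) (cells : List (Int × Int)) : List String :=
  let cols_by_row : PySem.Dict Int (PySem.Set Int) :=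
    cells.foldl (fun d rc => d.modify rc.1 PySem.Set.empty (fun s => PySem.Set.add s rc.2))
      PySem.Dict.empty
  (PySem.List.enumerate input).map (fun rl =>
    let l := rl.2.toList
    String.ofList ((cols_by_row.getD rl.1 PySem.Set.empty).foldl
      (fun chars c =>
        if 0 ≤ c ∧ c < PySem.List.len l then
          PySem.List.pySetD chars c (PySem.List.pyGetD l c '.')
        else chars)
      (List.replicate l.length '.')))

-- ===== PRECONDITION & SPEC =====
def Spec_simplify_input (input : List String) (cells : List (Int × Int)) (out : List String) : Prop := out = simplify_input_alt input cells
instance (input : List String) (cells : List (Int × Int)) (out : List String) : Decidable (Spec_simplify_input input cells out) := by unfold Spec_simplify_input; infer_instance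

-- ===== CLAIM (what is proved, stated in full; the proofs are below) =====
def Claim_equal_simplify_input : Prop := ∀ (input : List String) (cells : List (Int × Int)), Dom_simplify_input input cells → Spec_simplify_input input cells (simplify_input input cells)

-- ===== LEMMAS AND PROOFS =====

-- A's inner loop: a fold that appends one char per position is the map over the positions.
theorem foldl_ite_append {α β : Type} (l : List α) (p : α → Prop) [DecidablePred p]
    (f g : α → β) (acc : List β) :
    l.foldl (fun a x => if p x then a ++ [f x] else a ++ [g x]) acc
      = acc ++ l.map (fun x => if p x then f x else g x) := by
  induction l generalizing acc with
  | nil => simp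
  | cons x xs ih =>
    simp only [List.foldl_cons, List.map_cons, ih]
    split_ifs <;> simp

-- membership in the grouped index ↔ membership of the pair in cells
theorem mem_group (cs : List (Int × Int)) (d : PySem.Dict Int (PySem.Set Int)) (r c : Int) :
    c ∈ (cs.foldl (fun d rc => d.modify rc.1 PySem.Set.empty (fun s => PySem.Set.add s rc.2)) d).getD
        r PySem.Set.empty
      ↔ c ∈ d.getD r PySem.Set.empty ∨ (r, c) ∈ cs := by
  induction cs generalizing d with
  | nil => simp
  | cons p ps ih =>
    rcases p with ⟨a, b⟩
    rw [List.foldl_cons, ih, PySem.Dict.getD_modify]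
    by_cases h : r = a
    · subst h
      simp [PySem.Set.mem_add, Prod.ext_iff]
      try tauto
    · simp [h, Prod.ext_iff]
      try tauto

-- B's stamping loop, characterised pointwise.
theorem setfold_getElem? (l : List Char) (cs : List Int) (acc : List Char)
    (hlen : acc.length = l.length) (j : Nat) :
    ((cs.foldl (fun chars c =>
        if 0 ≤ c ∧ c < PySem.List.len l then
          PySem.List.pySetD chars c (PySem.List.pyGetD l c '.')
        else chars) acc))[j]?
      = if (j : Int) ∈ cs then l[j]? else acc[j]? := by
  induction cs generalizing acc with
  | nil => simp
  | cons c cs ih =>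
    rw [List.foldl_cons]
    by_cases hg : 0 ≤ c ∧ c < PySem.List.len l
    · have hc : c.toNat < l.length := by
        have := hg.2; simp [PySem.List.len_eq] at this; omega
      rw [if_pos hg]
      rw [PySem.List.pySetD_of_nonneg _ _ hg.1]
      rw [ih _ (by simp [hlen])]
      by_cases hin : (j : Int) ∈ cs
      · simp [hin]
      · simp only [hin, if_false, List.mem_cons]
        by_cases hjc : (j : Int) = c
        · have hj : j = c.toNat := by omega
          subst hj
          rw [PySem.List.pyGetD_eq_getElem l '.' hg.1 (by simpa [PySem.List.len_eq] using hg.2)]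
          simp [hc, hlen]
          exact fun h => absurd h (by omega)
        · have : c.toNat ≠ j := by omega
          simp [this, hjc]
    · rw [if_neg hg, ih _ hlen]
      by_cases hin : (j : Int) ∈ cs
      · simp [hin]
      · simp only [hin, if_false, List.mem_cons]
        by_cases hjc : (j : Int) = c
        · have hge : (l.length : Int) ≤ c := by
            rcases hg' : hg with _
            simp [PySem.List.len_eq] at hg
            have h0 : (0:Int) ≤ c := by omega
            omega
          have hj : l.length ≤ j := by omega
          simp [hjc, List.getElem?_eq_none (by omega : l.length ≤ j),
            List.getElem?_eq_none (by omega : acc.length ≤ j)]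
        · simp [hjc]

-- the per-line strings agree
theorem line_eq (cells : List (Int × Int)) (row : Int) (l : List Char) :
    ((PySem.List.enumerate l).foldl
      (fun new_line cc =>
        if (row, cc.1) ∈ cells then new_line ++ [cc.2] else new_line ++ ['.']) [])
    = ((cells.foldl (fun d rc => d.modify rc.1 PySem.Set.empty (fun s => PySem.Set.add s rc.2))
          PySem.Dict.empty).getD row PySem.Set.empty).foldl
        (fun chars c =>
          if 0 ≤ c ∧ c < PySem.List.len l then
            PySem.List.pySetD chars c (PySem.List.pyGetD l c '.')
          else chars)
        (List.replicate l.length '.') := by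
  rw [foldl_ite_append (PySem.List.enumerate l) (fun cc => (row, cc.1) ∈ cells) (fun cc => cc.2) (fun _ => '.') []]
  apply List.ext_getElem?
  intro j
  rw [setfold_getElem? l _ _ (by simp) j]
  simp only [mem_group, PySem.Dict.getD_empty]
  by_cases hj : j < l.length
  · simp only [List.nil_append, List.getElem?_map, PySem.List.getElem?_enumerate,
      List.getElem?_eq_getElem hj,
      List.getElem?_eq_getElem (by simpa using hj : j < (List.replicate l.length '.').length),
      Option.map_some, List.getElem_replicate, zero_add, PySem.Set.empty,
      List.not_mem_nil, false_or]
    by_cases hm : (row, (j : Int)) ∈ cells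
    · simp [hm]
    · simp [hm]
  · simp [List.getElem?_eq_none (by omega : l.length ≤ j),
      List.getElem?_eq_none (by simp; omega : (List.replicate l.length '.').length ≤ j),
      List.getElem?_eq_none (by simp [PySem.List.length_enumerate]; omega :
        (PySem.List.enumerate l).length ≤ j)]

-- ===== VERDICT (by name: the statement is the Claim_ definition above) =====
theorem simplify_input_spec : Claim_equal_simplify_input := by
  intro input cells _
  unfold Spec_simplify_input simplify_input simplify_input_alt
  simp only []
  apply List.map_congr_left
  intro rl _
  exact congrArg String.ofList (line_eq cells rl.1 rl.2.toList)
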